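-- pv_equiv track=rewrite | github.com/stormize/advanced-algorithms | better_suffix/suffix.py | char_sort
-- ===== SOURCE A (Python) =====
-- def char_sort(string):
--     count=[0]*122
--     order=['%']*(len(string))
--     for i in range(0,len(string)):
--         count[ord(string[i])]=count[ord(string[i])]+1
--     for i in range(1,122):
--         count[i]=count[i]+count[i-1]
--     for i in range(len(string)-1,-1,-1):
--         c=ord(string[i])
--         count[c]=count[c]-1
--         order[count[c]]=i
--     return order
-- ===== SOURCE B (Python) =====
-- def char_sort(string):
--     buckets = [[] for _ in range(122)]
--     for i in range(len(string)):
--         buckets[ord(string[i])].append(i)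
--     return [i for bucket in buckets for i in bucket]
-- ===== Notes on version B (the rewrite author's own statement) =====
-- stated objective: idiomatic
-- what changed: Replaces the cumulative-count / reverse-placement counting sort by a single-pass bucket sort: indices are appended to 122 per-character buckets and the buckets are flattened in order; the two counting passes and the backwards placement loop disappear.
import Mathlib
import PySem

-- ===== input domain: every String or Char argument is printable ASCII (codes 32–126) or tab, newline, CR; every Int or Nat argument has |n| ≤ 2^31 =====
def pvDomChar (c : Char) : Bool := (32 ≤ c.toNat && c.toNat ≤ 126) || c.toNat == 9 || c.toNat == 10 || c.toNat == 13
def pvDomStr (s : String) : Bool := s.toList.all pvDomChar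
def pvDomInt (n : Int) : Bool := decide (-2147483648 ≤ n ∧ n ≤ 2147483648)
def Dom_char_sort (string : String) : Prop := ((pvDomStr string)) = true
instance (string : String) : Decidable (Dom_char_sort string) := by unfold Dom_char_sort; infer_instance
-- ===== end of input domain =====

-- B replaces A's cumulative-count/reverse-placement counting sort by a one-pass
-- bucket sort (append each index to its character's bucket, flatten the buckets) — idiomatic.


-- ===== PORT A =====
-- Literal transliteration of A.  Indexing of `count`/`order` uses pySetD/pyGetD (total forms);
-- under Pre_ (every character code < 122) every index is in range, exactly where Python returns.
-- The Python placeholder '%' in `order` (a str) is represented by the Int 37; it is overwritten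
-- at every position before the list is returned.
def char_sort (string : String) : List Int :=
  let cs := string.toList
  let n : Int := PySem.Str.len string
  let count0 : List Int := PySem.List.pyRepeat [(0 : Int)] 122
  let order0 : List Int := PySem.List.pyRepeat [(37 : Int)] n
  let count1 := (PySem.List.pyRange 0 n 1).foldl (fun cnt i =>
      let c : Int := ((PySem.List.pyGetD cs i ' ').toNat : Int)
      PySem.List.pySetD cnt c (PySem.List.pyGetD cnt c 0 + 1)) count0
  let count2 := (PySem.List.pyRange 1 122 1).foldl (fun cnt i =>
      PySem.List.pySetD cnt i (PySem.List.pyGetD cnt i 0 + PySem.List.pyGetD cnt (i - 1) 0)) count1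
  let st := (PySem.List.pyRange (n - 1) (-1) (-1)).foldl
      (fun (st : List Int × List Int) i =>
        let c : Int := ((PySem.List.pyGetD cs i ' ').toNat : Int)
        let cnt := PySem.List.pySetD st.1 c (PySem.List.pyGetD st.1 c 0 - 1)
        (cnt, PySem.List.pySetD st.2 (PySem.List.pyGetD cnt c 0) i)) (count2, order0)
  st.2

-- ===== PORT B =====
-- Literal transliteration of Source B: 122 buckets, one pass appending indices, flatten.
def char_sort_alt (string : String) : List Int :=
  let cs := string.toList
  let n : Int := PySem.Str.len string
  let buckets0 : List (List Int) := (List.range 122).map (fun _ => ([] : List Int))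
  let buckets := (PySem.List.pyRange 0 n 1).foldl (fun bs i =>
      let c : Int := ((PySem.List.pyGetD cs i ' ').toNat : Int)
      PySem.List.pySetD bs c (PySem.List.pyGetD bs c [] ++ [i])) buckets0
  buckets.flatten

-- ===== PRECONDITION & SPEC =====
-- Pre_ excludes exactly the strings containing a character of code ≥ 122 ('z','{','|','}','~'):
-- there Python A raises IndexError (count has only 122 slots), and Python B raises the same.
def Pre_char_sort (string : String) : Prop := (string.toList.all (fun c => c.toNat < 122)) = true
instance (string : String) : Decidable (Pre_char_sort string) := by unfold Pre_char_sort; infer_instance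
def pvWitness_char_sort : String := "ba"
def Spec_char_sort (string : String) (out : List Int) : Prop := out = char_sort_alt string
instance (string : String) (out : List Int) : Decidable (Spec_char_sort string out) := by unfold Spec_char_sort; infer_instance

-- ===== CLAIM (what is proved, stated in full; the proofs are below) =====
def Claim_equal_char_sort : Prop := ∀ (string : String), Dom_char_sort string → Pre_char_sort string → Spec_char_sort string (char_sort string)

-- ===== LEMMAS AND PROOFS =====
-- Throughout, `os` is the list of character codes of the input; under Pre_ all are < 122.
-- `lo os c` counts codes < c, `eqc os k c` counts codes = c among the first k positions,
-- `pos os i` is the final position of index i in the stable sort; `cum os c` counts codes ≤ c;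
-- `cntAt os k` is A's count array when the placement loop still has indices 0..k-1 to process;
-- `bks os k` are B's buckets after the first k indices.
def lo (os : List Nat) (c : Nat) : Nat := os.countP (fun x => x < c)
def eqc (os : List Nat) (k : Nat) (c : Nat) : Nat := (os.take k).countP (fun x => x = c)
def pos (os : List Nat) (i : Nat) : Nat := lo os (os.getD i 0) + eqc os i (os.getD i 0)
def cum (os : List Nat) (c : Nat) : Nat := os.countP (fun x => decide (x ≤ c))
def cntAt (os : List Nat) (k : Nat) : List Int :=
  (List.range 122).map (fun c => ((lo os c + eqc os k c : Nat) : Int))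
def bks (os : List Nat) (k : Nat) : List (List Int) :=
  (List.range 122).map (fun c => ((List.range k).filter (fun j => os.getD j 0 = c)).map (fun j : Nat => (j : Int)))

theorem set_map_range {α : Type} (m a : Nat) (f : Nat → α) (v : α) :
    ((List.range m).map f).set a v = (List.range m).map (fun c => if c = a then v else f c) := by
  apply List.ext_getElem
  · simp
  · intro i h1 h2
    simp only [List.getElem_set, List.getElem_map, List.getElem_range]
    simp at h1
    by_cases hia : i = a <;> simp [hia]
    exact fun h => absurd h.symm hia

theorem getD_map_range' {α : Type} (m a : Nat) (f : Nat → α) (d : α) (ha : a < m) :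
    ((List.range m).map f).getD a d = f a := by
  rw [List.getD_eq_getElem] <;> simp [ha]

theorem eqc_succ (os : List Nat) (i : Nat) (hi : i < os.length) (c : Nat) :
    eqc os (i + 1) c = eqc os i c + (if os.getD i 0 = c then 1 else 0) := by
  unfold eqc
  rw [List.take_succ, List.countP_append]
  rw [List.getD_eq_getElem _ _ hi]
  simp [List.getElem?_eq_getElem hi]

theorem eqc_mono (os : List Nat) (i j : Nat) (hij : i ≤ j) (c : Nat) :
    eqc os i c ≤ eqc os j c := by
  unfold eqc
  have h : os.take i = (os.take j).take i := by rw [List.take_take, Nat.min_eq_left hij]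
  rw [h]
  exact (List.take_sublist _ _).countP_le

theorem eqc_le_count (os : List Nat) (k c : Nat) :
    eqc os k c ≤ os.countP (fun x => x = c) := by
  exact (List.take_sublist k os).countP_le

theorem countP_split (os : List Nat) (m : Nat) :
    os.countP (fun x => decide (x < m)) + os.countP (fun x => x == m) = os.countP (fun x => decide (x ≤ m)) := by
  induction os with
  | nil => simp
  | cons a t ih =>
    simp only [List.countP_cons]
    rcases Nat.lt_trichotomy a m with h|h|h
    · simp [h, Nat.ne_of_lt h, Nat.le_of_lt h]; omega
    · simp [h]; omega
    · simp [Nat.not_le.mpr h, Nat.ne_of_gt h, Nat.lt_asymm h]; omega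

theorem lo_add_countP (os : List Nat) (c : Nat) :
    lo os c + os.countP (fun x => x = c) = os.countP (fun x => x ≤ c) := by
  have h := countP_split os c
  have h2 : os.countP (fun x => x = c) = os.countP (fun x => x == c) :=
    List.countP_congr (fun x _ => by simp)
  unfold lo
  omega

theorem countP_lt_succ (os : List Nat) (m : Nat) :
    os.countP (fun x => decide (x < m)) + os.countP (fun x => decide (x = m)) = os.countP (fun x => decide (x < m + 1)) := by
  have h1 := countP_split os m
  have h2 : os.countP (fun x => decide (x = m)) = os.countP (fun x => x == m) :=
    List.countP_congr (fun x _ => by simp)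
  have h3 : os.countP (fun x => decide (x ≤ m)) = os.countP (fun x => decide (x < m + 1)) :=
    List.countP_congr (fun x _ => by simp [Nat.lt_succ_iff])
  omega

theorem pos_lt (os : List Nat) (i : Nat) (hi : i < os.length) : pos os i < os.length := by
  unfold pos
  have h1 : eqc os (i+1) (os.getD i 0) = eqc os i (os.getD i 0) + 1 := by
    rw [eqc_succ os i hi]; simp
  have h2 : eqc os (i+1) (os.getD i 0) ≤ os.countP (fun x => x = os.getD i 0) := by
    have := eqc_le_count os (i+1) (os.getD i 0); omega
  have h3 := lo_add_countP os (os.getD i 0)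
  have h4 : os.countP (fun x => x ≤ os.getD i 0) ≤ os.length := List.countP_le_length
  omega

theorem pos_strict (os : List Nat) (i i' : Nat) (hi : i < os.length) (hi' : i' < os.length)
    (h : os.getD i 0 < os.getD i' 0 ∨ (os.getD i 0 = os.getD i' 0 ∧ i < i')) :
    pos os i < pos os i' := by
  rcases h with h | ⟨hc, hii⟩
  · -- different characters
    have h1 : eqc os (i+1) (os.getD i 0) = eqc os i (os.getD i 0) + 1 := by
      rw [eqc_succ os i hi]; simp
    have h2 : eqc os (i+1) (os.getD i 0) ≤ os.countP (fun x => x = os.getD i 0) :=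
      eqc_le_count os (i+1) (os.getD i 0)
    calc pos os i = lo os (os.getD i 0) + eqc os i (os.getD i 0) := rfl
      _ < lo os (os.getD i 0) + eqc os (i+1) (os.getD i 0) := by omega
      _ ≤ lo os (os.getD i 0) + os.countP (fun x => x = os.getD i 0) := Nat.add_le_add_left h2 _
      _ = os.countP (fun x => x ≤ os.getD i 0) := lo_add_countP os _
      _ ≤ os.countP (fun x => x < os.getD i' 0) := by
          apply List.countP_mono_left
          intro x _ hx
          simp only [decide_eq_true_eq] at hx ⊢
          omega
      _ = lo os (os.getD i' 0) := rfl
      _ ≤ pos os i' := Nat.le_add_right _ _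
  · -- same character, earlier index
    have h1 : eqc os (i+1) (os.getD i 0) = eqc os i (os.getD i 0) + 1 := by
      rw [eqc_succ os i hi]; simp
    have h2 : eqc os (i+1) (os.getD i 0) ≤ eqc os i' (os.getD i 0) := eqc_mono os (i+1) i' hii _
    unfold pos
    rw [← hc]
    omega

theorem pos_inj (os : List Nat) (i i' : Nat) (hi : i < os.length) (hi' : i' < os.length)
    (hne : i ≠ i') : pos os i ≠ pos os i' := by
  rcases Nat.lt_trichotomy (os.getD i 0) (os.getD i' 0) with h|h|h
  · exact Nat.ne_of_lt (pos_strict os i i' hi hi' (Or.inl h))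
  · rcases Nat.lt_or_ge i i' with hii|hii
    · exact Nat.ne_of_lt (pos_strict os i i' hi hi' (Or.inr ⟨h, hii⟩))
    · have : i' < i := by omega
      exact (Nat.ne_of_lt (pos_strict os i' i hi' hi (Or.inr ⟨h.symm, this⟩))).symm
  · exact (Nat.ne_of_lt (pos_strict os i' i hi' hi (Or.inl h))).symm

theorem pos_surj (os : List Nat) (p : Nat) (hp : p < os.length) :
    ∃ i, i < os.length ∧ pos os i = p := by
  classical
  let f : Fin os.length → Fin os.length := fun i => ⟨pos os i.1, pos_lt os i.1 i.2⟩
  have hinj : Function.Injective f := by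
    intro a b hab
    by_contra hne
    have : a.1 ≠ b.1 := fun h => hne (Fin.ext h)
    exact pos_inj os a.1 b.1 a.2 b.2 this (congrArg Fin.val hab)
  have hsurj : Function.Surjective f := Finite.surjective_of_injective hinj
  obtain ⟨i, hfi⟩ := hsurj ⟨p, hp⟩
  exact ⟨i.1, i.2, congrArg Fin.val hfi⟩

theorem phase1_gen (os : List Nat) (h : ∀ x ∈ os, x < 122) (g : Nat → Int) :
    os.foldl (fun cnt x => cnt.set x (cnt.getD x 0 + 1)) ((List.range 122).map g)
      = (List.range 122).map (fun c => g c + (os.count c : Int)) := by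
  induction os generalizing g with
  | nil => simp
  | cons x t ih =>
    have hx : x < 122 := h x (by simp)
    simp only [List.foldl_cons]
    rw [getD_map_range' 122 x g 0 hx, set_map_range 122 x g (g x + 1),
        ih (fun y hy => h y (by simp [hy]))]
    apply List.map_congr_left
    intro c hc
    by_cases hcx : c = x
    · subst hcx; simp [List.count_cons_self]; ring
    · simp [hcx, List.count_cons_of_ne (by exact fun hh => hcx hh.symm)]

theorem phase1 (os : List Nat) (h : ∀ x ∈ os, x < 122) :
    os.foldl (fun cnt x => cnt.set x (cnt.getD x 0 + 1)) (List.replicate 122 (0 : Int))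
      = (List.range 122).map (fun c => (os.count c : Int)) := by
  have : (List.replicate 122 (0 : Int)) = (List.range 122).map (fun _ => (0 : Int)) := by
    simp [List.map_const']
  rw [this, phase1_gen os h]
  simp

theorem cum_succ (os : List Nat) (m : Nat) (hm : 1 ≤ m) :
    cum os m = os.count m + cum os (m - 1) := by
  have h1 := countP_split os m
  have h2 : os.countP (fun x => decide (x < m)) = os.countP (fun x => decide (x ≤ m - 1)) :=
    List.countP_congr (fun x _ => by simp; omega)
  have h3 : os.count m = os.countP (fun x => x == m) := List.count_eq_countP
  unfold cum
  omega

theorem phase2_gen (os : List Nat) : ∀ t m : Nat, m + t = 122 → 1 ≤ m →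
    (PySem.List.pyRange (m : Int) 122 1).foldl
        (fun cnt i => PySem.List.pySetD cnt i (PySem.List.pyGetD cnt i 0 + PySem.List.pyGetD cnt (i - 1) 0))
        ((List.range 122).map (fun c => (((if c < m then cum os c else os.count c) : Nat) : Int)))
      = (List.range 122).map (fun c => ((cum os c : Nat) : Int)) := by
  intro t
  induction t with
  | zero =>
    intro m hm _
    have : m = 122 := by omega
    subst this
    rw [PySem.List.pyRange_one_eq_nil (by norm_num)]
    simp only [List.foldl_nil]
    apply List.map_congr_left
    intro c hc
    simp at hc
    simp [hc]
  | succ t ih =>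
    intro m hm h1
    have hmlt : m < 122 := by omega
    rw [PySem.List.pyRange_one_cons (by exact_mod_cast hmlt)]
    simp only [List.foldl_cons]
    have hcast : ((m : Int) + 1) = ((m + 1 : Nat) : Int) := by push_cast; ring
    have hcast2 : ((m : Int) - 1) = ((m - 1 : Nat) : Int) := by omega
    rw [hcast2]
    rw [PySem.List.pySetD_natCast, PySem.List.pyGetD_natCast, PySem.List.pyGetD_natCast]
    rw [getD_map_range' 122 m _ 0 hmlt, getD_map_range' 122 (m-1) _ 0 (by omega)]
    rw [set_map_range]
    have hstep : (List.range 122).map (fun c => if c = m then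
          (((if m < m then cum os m else os.count m) : Nat) : Int) + (((if m - 1 < m then cum os (m-1) else os.count (m-1)) : Nat) : Int)
        else (((if c < m then cum os c else os.count c) : Nat) : Int))
        = (List.range 122).map (fun c => (((if c < m + 1 then cum os c else os.count c) : Nat) : Int)) := by
      apply List.map_congr_left
      intro c hc
      by_cases hcm : c = m
      · subst hcm
        simp [Nat.sub_lt h1, cum_succ os c h1]
      · have : (c < m) = (c < m + 1) := by
          simp only [eq_iff_iff]; omega
        simp [hcm, this]
    rw [hstep, hcast, ih (m+1) (by omega) (by omega)]

theorem phase2' (os : List Nat) :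
    (PySem.List.pyRange 1 122 1).foldl
        (fun cnt i => PySem.List.pySetD cnt i (PySem.List.pyGetD cnt i 0 + PySem.List.pyGetD cnt (i - 1) 0))
        ((List.range 122).map (fun c => (os.count c : Int)))
      = (List.range 122).map (fun c => ((cum os c : Nat) : Int)) := by
  have h0 : (List.range 122).map (fun c => (os.count c : Int))
      = (List.range 122).map (fun c => (((if c < 1 then cum os c else os.count c) : Nat) : Int)) := by
    apply List.map_congr_left
    intro c _
    by_cases hc : c < 1
    · have : c = 0 := by omega
      subst this
      have hc0 : os.count 0 = cum os 0 := by
        rw [List.count_eq_countP]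
        unfold cum
        apply List.countP_congr
        intro x _
        simp [Nat.le_zero]
      simp [hc0]  -- count 0 = cum 0
    · simp [hc]
  rw [h0]
  exact_mod_cast phase2_gen os 121 1 (by norm_num) (by norm_num)

theorem phaseB (os : List Nat) (h : ∀ x ∈ os, x < 122) (k : Nat) (hk : k ≤ os.length) :
    ((List.range k).map (fun j : Nat => (j : Int))).foldl
        (fun bs i => PySem.List.pySetD bs (((os.getD i.toNat 0 : Nat) : Int))
            (PySem.List.pyGetD bs (((os.getD i.toNat 0 : Nat) : Int)) [] ++ [i]))
        ((List.range 122).map (fun _ => ([] : List Int)))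
      = bks os k := by
  induction k with
  | zero => simp [bks]
  | succ k ih =>
    have hk' : k ≤ os.length := by omega
    have hklt : k < os.length := by omega
    have hl : (List.range (k+1)).map (fun j : Nat => (j : Int)) = (List.range k).map (fun j : Nat => (j : Int)) ++ [(k : Int)] := by
      rw [List.range_succ]; simp
    rw [hl, List.foldl_append, ih hk']
    simp only [List.foldl_cons, List.foldl_nil]
    have hmem : os.getD k 0 ∈ os := by
      rw [List.getD_eq_getElem _ _ hklt]; exact List.getElem_mem hklt
    have ha : os.getD k 0 < 122 := h _ hmem
    have htn : ((k : Int)).toNat = k := Int.toNat_natCast k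
    rw [PySem.List.pySetD_natCast, PySem.List.pyGetD_natCast, htn]
    unfold bks
    rw [getD_map_range' 122 (os.getD k 0) _ [] ha, set_map_range]
    apply List.map_congr_left
    intro c hc
    rw [List.range_succ, List.filter_append]
    by_cases hca : c = os.getD k 0
    · subst hca
      simp
    · have h2 : ¬ (c = os[k]?.getD 0) := by rw [← List.getD_eq_getElem?_getD]; exact hca
      have h3 : ¬ (os[k]?.getD 0 = c) := fun hh => h2 hh.symm
      simp [h2, h3]

theorem filter_range_count (os : List Nat) (k : Nat) (hk : k ≤ os.length) (c : Nat) :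
    ((List.range k).filter (fun j => os.getD j 0 = c)).length = eqc os k c := by
  induction k with
  | zero => simp [eqc]
  | succ k ih =>
    have hklt : k < os.length := by omega
    rw [List.range_succ, List.filter_append, List.length_append, ih (by omega),
        eqc_succ os k hklt c]
    by_cases hc : os.getD k 0 = c
    · simp [← List.getD_eq_getElem?_getD, hc]
    · simp [← List.getD_eq_getElem?_getD, hc]

theorem sum_eqc_range (os : List Nat) (m : Nat) :
    ((List.range m).map (fun c => os.countP (fun x => x = c))).sum = os.countP (fun x => x < m) := by
  induction m with
  | zero => simp
  | succ m ih =>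
    rw [List.range_succ, List.map_append, List.sum_append]
    simp only [List.map_cons, List.map_nil, List.sum_cons, List.sum_nil, ih]
    have := countP_lt_succ os m
    omega

theorem eqc_full (os : List Nat) (c : Nat) : eqc os os.length c = os.countP (fun x => x = c) := by
  unfold eqc
  rw [List.take_length]

theorem bks_flatten_length (os : List Nat) (h : ∀ x ∈ os, x < 122) :
    (bks os os.length).flatten.length = os.length := by
  unfold bks
  rw [List.length_flatten, List.map_map]
  have h1 : ((List.range 122).map (List.length ∘ fun c => ((List.range os.length).filter (fun j => os.getD j 0 = c)).map (fun j : Nat => (j : Int)))).sum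
      = ((List.range 122).map (fun c => os.countP (fun x => x = c))).sum := by
    congr 1
    apply List.map_congr_left
    intro c _
    simp only [Function.comp_apply, List.length_map]
    rw [filter_range_count os os.length (Nat.le_refl _) c, eqc_full]
  rw [h1, sum_eqc_range]
  rw [List.countP_eq_length.mpr]
  intro x hx
  simp [h x hx]

theorem getD_append_add {α : Type} [Inhabited α] (l1 l2 : List α) (r : Nat) (d : α) :
    (l1 ++ l2).getD (l1.length + r) d = l2.getD r d := by
  rw [List.getD_eq_getElem?_getD, List.getD_eq_getElem?_getD,
      List.getElem?_append_right (Nat.le_add_right _ _), Nat.add_sub_cancel_left]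

theorem bks_flatten_getD (os : List Nat) (h : ∀ x ∈ os, x < 122) (i : Nat) (hi : i < os.length) :
    (bks os os.length).flatten.getD (pos os i) 0 = (i : Int) := by
  have hmem : os.getD i 0 ∈ os := by
    rw [List.getD_eq_getElem _ _ hi]; exact List.getElem_mem hi
  have ha : os.getD i 0 < 122 := h _ hmem
  set a := os.getD i 0 with hadef
  set bucket : Nat → List Int :=
    fun c => ((List.range os.length).filter (fun j => os.getD j 0 = c)).map (fun j : Nat => (j : Int)) with hbdef
  have h122 : (122 : Nat) = (a + 1) + (121 - a) := by omega
  have hsplit : List.range 122 = (List.range a ++ [a]) ++ (List.range (121 - a)).map ((a+1) + ·) := by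
    rw [h122, List.range_add, List.range_succ]
  have hflat : (bks os os.length).flatten
      = (((List.range a).map bucket).flatten ++ bucket a)
        ++ (((List.range (121 - a)).map ((a+1) + ·)).map bucket).flatten := by
    unfold bks
    rw [hsplit, List.map_append, List.flatten_append, List.map_append, List.flatten_append]
    simp [hbdef]
  have hlen1 : (((List.range a).map bucket).flatten).length = lo os a := by
    rw [List.length_flatten, List.map_map]
    have : ((List.range a).map (List.length ∘ bucket)).sum
        = ((List.range a).map (fun c => os.countP (fun x => x = c))).sum := by
      congr 1
      apply List.map_congr_left
      intro c _
      simp only [Function.comp_apply, hbdef, List.length_map]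
      rw [filter_range_count os os.length (Nat.le_refl _) c, eqc_full]
    rw [this, sum_eqc_range]
    rfl
  have hbl : (bucket a).length = eqc os os.length a := by
    rw [hbdef]
    simp only [List.length_map]
    exact filter_range_count os os.length (Nat.le_refl _) a
  have heqclt : eqc os i a < eqc os os.length a := by
    have h1 : eqc os (i+1) a = eqc os i a + 1 := by
      rw [eqc_succ os i hi]; simp [hadef]
    have h2 : eqc os (i+1) a ≤ eqc os os.length a := eqc_mono os (i+1) os.length (by omega) a
    omega
  rw [hflat]
  rw [List.getD_append _ _ _ _ (by rw [List.length_append, hlen1, hbl]; unfold pos; rw [← hadef]; omega)]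
  have hpos : pos os i = (((List.range a).map bucket).flatten).length + eqc os i a := by
    rw [hlen1]; rfl
  rw [hpos, getD_append_add]
  -- inside bucket a
  have hrange : List.range os.length = (List.range i ++ [i]) ++ (List.range (os.length - (i+1))).map ((i+1) + ·) := by
    have h0 : os.length = (i + 1) + (os.length - (i+1)) := by omega
    conv_lhs => rw [h0]
    rw [List.range_add, List.range_succ]
  have hpi : (decide (os.getD i 0 = a)) = true := by simp [hadef]
  have hbucket : bucket a
      = (((List.range i).filter (fun j => os.getD j 0 = a)).map (fun j : Nat => (j : Int)) ++ [(i : Int)])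
        ++ (((List.range (os.length - (i+1))).map ((i+1) + ·)).filter (fun j => os.getD j 0 = a)).map (fun j : Nat => (j : Int)) := by
    rw [hbdef]
    beta_reduce
    conv_lhs => rw [hrange]
    rw [List.filter_append, List.filter_append, List.map_append, List.map_append]
    have hpi2 : (decide (os[i]?.getD 0 = a)) = true := by
      rw [← List.getD_eq_getElem?_getD]; exact hpi
    simp [hpi2]
  have heqc : eqc os i a = (((List.range i).filter (fun j => os.getD j 0 = a)).map (fun j : Nat => (j : Int))).length := by
    rw [List.length_map, filter_range_count os i (by omega) a]
  rw [hbucket]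
  rw [List.getD_append _ _ _ _ (by rw [List.length_append, ← heqc]; simp)]
  rw [heqc]
  rw [List.getD_append_right _ _ _ _ (Nat.le_refl _), Nat.sub_self]
  rfl

theorem getD_set_self (l : List Int) (p : Nat) (v : Int) (hp : p < l.length) :
    (l.set p v).getD p 0 = v := by
  rw [List.getD_eq_getElem _ _ (by simpa using hp)]
  simp [List.getElem_set, hp]

theorem getD_set_ne (l : List Int) (p q : Nat) (v : Int) (hpq : p ≠ q) :
    (l.set p v).getD q 0 = l.getD q 0 := by
  rw [List.getD_eq_getElem?_getD, List.getD_eq_getElem?_getD, List.getElem?_set_ne hpq]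

theorem phase3 (os : List Nat) (h : ∀ x ∈ os, x < 122) (k : Nat) (hk : k ≤ os.length)
    (ord : List Int) (hord : ord.length = os.length) :
    (((List.range k).map (fun j : Nat => ((k : Int) - 1 - j))).foldl
      (fun (st : List Int × List Int) i =>
        let c : Int := ((os.getD i.toNat 0 : Nat) : Int)
        let cnt := PySem.List.pySetD st.1 c (PySem.List.pyGetD st.1 c 0 - 1)
        (cnt, PySem.List.pySetD st.2 (PySem.List.pyGetD cnt c 0) i)) (cntAt os k, ord)).2.length = os.length ∧
    (∀ i, i < k → (((List.range k).map (fun j : Nat => ((k : Int) - 1 - j))).foldl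
      (fun (st : List Int × List Int) i =>
        let c : Int := ((os.getD i.toNat 0 : Nat) : Int)
        let cnt := PySem.List.pySetD st.1 c (PySem.List.pyGetD st.1 c 0 - 1)
        (cnt, PySem.List.pySetD st.2 (PySem.List.pyGetD cnt c 0) i)) (cntAt os k, ord)).2.getD (pos os i) 0 = (i : Int)) ∧
    (∀ p, p < os.length → (∀ i, i < k → pos os i ≠ p) → (((List.range k).map (fun j : Nat => ((k : Int) - 1 - j))).foldl
      (fun (st : List Int × List Int) i =>
        let c : Int := ((os.getD i.toNat 0 : Nat) : Int)
        let cnt := PySem.List.pySetD st.1 c (PySem.List.pyGetD st.1 c 0 - 1)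
        (cnt, PySem.List.pySetD st.2 (PySem.List.pyGetD cnt c 0) i)) (cntAt os k, ord)).2.getD p 0 = ord.getD p 0) := by
  induction k generalizing ord with
  | zero =>
    refine ⟨by simpa using hord, ?_, ?_⟩
    · intro i hik; omega
    · intro p hp _; rfl
  | succ k ih =>
    have hklt : k < os.length := by omega
    have hl : (List.range (k+1)).map (fun j : Nat => (((k+1 : Nat) : Int) - 1 - j))
        = ((k : Nat) : Int) :: (List.range k).map (fun j : Nat => ((k : Int) - 1 - j)) := by
      rw [List.range_succ_eq_map, List.map_cons, List.map_map]
      congr 1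
      · push_cast; ring
      · apply List.map_congr_left
        intro j _
        simp only [Function.comp_apply]
        push_cast; ring
    rw [hl, List.foldl_cons]
    have hmem : os.getD k 0 ∈ os := by
      rw [List.getD_eq_getElem _ _ hklt]; exact List.getElem_mem hklt
    have ha : os.getD k 0 < 122 := h _ hmem
    set a := os.getD k 0 with hadef
    have htn : ((k : Int)).toNat = k := Int.toNat_natCast k
    have hsucc : eqc os (k+1) a = eqc os k a + 1 := by
      rw [eqc_succ os k hklt]; simp [hadef]
    -- the first iteration turns cntAt (k+1) into cntAt k and writes k at pos os k
    have hget : PySem.List.pyGetD (cntAt os (k+1)) ((a : Nat) : Int) 0 = ((lo os a + eqc os (k+1) a : Nat) : Int) := by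
      rw [PySem.List.pyGetD_natCast]
      exact getD_map_range' 122 a _ 0 ha
    have hval : ((lo os a + eqc os (k+1) a : Nat) : Int) - 1 = ((lo os a + eqc os k a : Nat) : Int) := by
      rw [hsucc]; push_cast; ring
    have hcnt : (cntAt os (k+1)).set a ((lo os a + eqc os k a : Nat) : Int) = cntAt os k := by
      unfold cntAt
      rw [set_map_range]
      apply List.map_congr_left
      intro c hc
      by_cases hca : c = a
      · subst hca; simp
      · have : eqc os (k+1) c = eqc os k c := by
          rw [eqc_succ os k hklt c, if_neg (by rw [← hadef]; exact fun hh => hca hh.symm)]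
          omega
        simp [hca, this]
    have hposk : lo os a + eqc os k a = pos os k := rfl
    have hstep : (let c : Int := ((os.getD (((k : Nat) : Int)).toNat 0 : Nat) : Int)
        let cnt := PySem.List.pySetD (cntAt os (k+1), ord).1 c (PySem.List.pyGetD (cntAt os (k+1), ord).1 c 0 - 1)
        (cnt, PySem.List.pySetD (cntAt os (k+1), ord).2 (PySem.List.pyGetD cnt c 0) ((k : Nat) : Int)))
        = (cntAt os k, ord.set (pos os k) ((k : Nat) : Int)) := by
      simp only []
      simp only [htn]
      rw [← hadef]
      simp only [PySem.List.pySetD_natCast]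
      rw [hget, hval, hcnt]
      have hget2 : PySem.List.pyGetD (cntAt os k) ((a : Nat) : Int) 0 = ((lo os a + eqc os k a : Nat) : Int) := by
        rw [PySem.List.pyGetD_natCast]
        exact getD_map_range' 122 a _ 0 ha
      rw [hget2, hposk]
      rw [show (((pos os k : Nat) : Int)) = ((pos os k : Nat) : Int) from rfl]
      simp only [PySem.List.pySetD_natCast, Int.toNat_natCast]
    rw [hstep]
    obtain ⟨L, B, C⟩ := ih (by omega) (ord.set (pos os k) ((k : Nat) : Int)) (by simpa using hord)
    refine ⟨L, ?_, ?_⟩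
    · intro i hik
      rcases Nat.lt_or_ge i k with hik' | hik'
      · exact B i hik'
      · have hik2 : i = k := by omega
        subst hik2
        have hplt : pos os i < os.length := pos_lt os i hklt
        rw [C (pos os i) hplt (fun i' hi' => pos_inj os i' i (by omega) hklt (by omega))]
        exact getD_set_self ord (pos os i) _ (by omega)
    · intro p hp hnone
      rw [C p hp (fun i hi => hnone i (by omega))]
      exact getD_set_ne ord (pos os k) p _ (hnone k (by omega))

theorem ports_eq (string : String) (hpre : ∀ c ∈ string.toList, c.toNat < 122) :
    char_sort string = char_sort_alt string := by
  simp only [char_sort, char_sort_alt]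
  have hos : ∀ x ∈ string.toList.map Char.toNat, x < 122 := by
    intro x hx
    obtain ⟨c, hc, rfl⟩ := List.mem_map.mp hx
    exact hpre c hc
  have hosl : (string.toList.map Char.toNat).length = string.toList.length := List.length_map _
  have hn : PySem.Str.len string = (string.toList.length : Int) := by
    simp [PySem.Str.len_eq]
  rw [hn]
  have h0 : PySem.List.pyRepeat [(0 : Int)] 122 = List.replicate 122 (0 : Int) := by
    rw [PySem.List.pyRepeat_singleton]
    rfl
  have h37 : PySem.List.pyRepeat [(37 : Int)] ((string.toList.length : Nat) : Int)
      = List.replicate string.toList.length (37 : Int) := by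
    rw [PySem.List.pyRepeat_singleton, Int.toNat_natCast]
  -- the character read in each loop is the code list entry
  have hread : ∀ i : Int, 0 ≤ i → i < (string.toList.length : Int) →
      ((PySem.List.pyGetD string.toList i ' ').toNat : Int)
        = (((string.toList.map Char.toNat).getD i.toNat 0 : Nat) : Int) := by
    intro i h1 h2
    have hlt : i.toNat < string.toList.length := by omega
    rw [PySem.List.pyGetD_eq_getElem string.toList ' ' h1 (by simpa using h2)]
    rw [List.getD_eq_getElem _ _ (by simpa using hlt)]
    simp
  -- ===== A side =====
  rw [h0, h37]
  rw [PySem.List.foldl_pyRange_zero_pyGetD' string.toList ' '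
      (fun cnt ch => PySem.List.pySetD cnt ((ch.toNat : Int)) (PySem.List.pyGetD cnt ((ch.toNat : Int)) 0 + 1))
      (List.replicate 122 (0 : Int))]
  have hfold1 : List.foldl
      (fun cnt ch => PySem.List.pySetD cnt ((ch.toNat : Int)) (PySem.List.pyGetD cnt ((ch.toNat : Int)) 0 + 1))
      (List.replicate 122 (0 : Int)) string.toList
      = (List.range 122).map (fun c => (((string.toList.map Char.toNat).count c : Nat) : Int)) := by
    rw [← phase1 (string.toList.map Char.toNat) hos]
    rw [List.foldl_map]
    apply PySem.List.foldl_congr_mem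
    intro acc x _
    simp [PySem.List.pySetD_natCast, PySem.List.pyGetD_natCast]
  rw [hfold1, phase2' (string.toList.map Char.toNat)]
  have hcnt2 : (List.range 122).map (fun c => ((cum (string.toList.map Char.toNat) c : Nat) : Int))
      = cntAt (string.toList.map Char.toNat) (string.toList.map Char.toNat).length := by
    unfold cntAt
    apply List.map_congr_left
    intro c _
    congr 1
    rw [eqc_full]
    exact (lo_add_countP _ c).symm
  rw [hcnt2]
  have hlist : PySem.List.pyRange ((string.toList.length : Int) - 1) (-1) (-1)
      = (List.range (string.toList.map Char.toNat).length).map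
          (fun j : Nat => ((((string.toList.map Char.toNat).length : Nat) : Int) - 1 - j)) := by
    rw [PySem.List.pyRange_neg_one, hosl]
    rw [show (((string.toList.length : Nat) : Int) - 1 - (-1)).toNat = string.toList.length by omega]
  rw [hlist]
  have hbodyA : ∀ (acc : List Int × List Int), ∀ x ∈ (List.range (string.toList.map Char.toNat).length).map
        (fun j : Nat => ((((string.toList.map Char.toNat).length : Nat) : Int) - 1 - j)),
      (PySem.List.pySetD acc.1 (((PySem.List.pyGetD string.toList x ' ').toNat : Int))
          (PySem.List.pyGetD acc.1 (((PySem.List.pyGetD string.toList x ' ').toNat : Int)) 0 - 1),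
        PySem.List.pySetD acc.2
          (PySem.List.pyGetD
            (PySem.List.pySetD acc.1 (((PySem.List.pyGetD string.toList x ' ').toNat : Int))
              (PySem.List.pyGetD acc.1 (((PySem.List.pyGetD string.toList x ' ').toNat : Int)) 0 - 1))
            (((PySem.List.pyGetD string.toList x ' ').toNat : Int)) 0) x)
      = (PySem.List.pySetD acc.1 ((((string.toList.map Char.toNat).getD x.toNat 0 : Nat) : Int))
          (PySem.List.pyGetD acc.1 ((((string.toList.map Char.toNat).getD x.toNat 0 : Nat) : Int)) 0 - 1),
        PySem.List.pySetD acc.2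
          (PySem.List.pyGetD
            (PySem.List.pySetD acc.1 ((((string.toList.map Char.toNat).getD x.toNat 0 : Nat) : Int))
              (PySem.List.pyGetD acc.1 ((((string.toList.map Char.toNat).getD x.toNat 0 : Nat) : Int)) 0 - 1))
            ((((string.toList.map Char.toNat).getD x.toNat 0 : Nat) : Int)) 0) x) := by
    intro acc x hx
    obtain ⟨j, hj, rfl⟩ := List.mem_map.mp hx
    rw [List.mem_range, hosl] at hj
    rw [hread _ (by push_cast; omega) (by push_cast; omega)]
  rw [PySem.List.foldl_congr_mem _ _ _ _ hbodyA]
  -- ===== B side =====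
  have hlistB : PySem.List.pyRange 0 ((string.toList.length : Nat) : Int)
      = (List.range (string.toList.map Char.toNat).length).map (fun j : Nat => (j : Int)) := by
    rw [PySem.List.pyRange_one, hosl]
    rw [show (((string.toList.length : Nat) : Int) - 0).toNat = string.toList.length by omega]
    apply List.map_congr_left
    intro j _
    omega
  rw [hlistB]
  have hbodyB : ∀ (bs : List (List Int)), ∀ x ∈ (List.range (string.toList.map Char.toNat).length).map (fun j : Nat => (j : Int)),
      PySem.List.pySetD bs (((PySem.List.pyGetD string.toList x ' ').toNat : Int))
        (PySem.List.pyGetD bs (((PySem.List.pyGetD string.toList x ' ').toNat : Int)) [] ++ [x])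
      = PySem.List.pySetD bs ((((string.toList.map Char.toNat).getD x.toNat 0 : Nat) : Int))
        (PySem.List.pyGetD bs ((((string.toList.map Char.toNat).getD x.toNat 0 : Nat) : Int)) [] ++ [x]) := by
    intro bs x hx
    obtain ⟨j, hj, rfl⟩ := List.mem_map.mp hx
    rw [List.mem_range, hosl] at hj
    rw [hread _ (by push_cast; omega) (by push_cast; omega)]
  rw [PySem.List.foldl_congr_mem _ _ _ _ hbodyB]
  rw [phaseB (string.toList.map Char.toNat) hos (string.toList.map Char.toNat).length (le_refl _)]
  -- ===== combine via positions =====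
  obtain ⟨LA, BA, CA⟩ := phase3 (string.toList.map Char.toNat) hos (string.toList.map Char.toNat).length
      (le_refl _) (List.replicate string.toList.length (37 : Int)) (by simp [hosl])
  apply List.ext_getElem
  · exact LA.trans (bks_flatten_length _ hos).symm
  · intro p hp1 hp2
    have hposp : p < (string.toList.map Char.toNat).length := lt_of_lt_of_eq hp1 LA
    obtain ⟨i, hiL, hip⟩ := pos_surj _ p hposp
    subst hip
    have e1 := BA i hiL
    have e2 := bks_flatten_getD _ hos i hiL
    exact ((List.getD_eq_getElem _ _ hp1).symm.trans e1).trans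
      (((List.getD_eq_getElem _ _ hp2).symm.trans e2).symm)

-- ===== VERDICT (by name: the statement is the Claim_ definition above) =====
theorem char_sort_spec : Claim_equal_char_sort := by
  intro string _ hpre
  refine ports_eq string ?_
  intro c hc
  simpa using List.all_eq_true.mp hpre c hc
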